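-- pv_equiv track=rewrite | github.com/ThinkingAndDoing/MySourceCode | File system/Rename.py | getFormatStr
-- ===== SOURCE A (Python) =====
-- def getFormatStr(length, value):
-- 	if value<0 or length<=0:
-- 		return "error"
--
-- 	if value == 0:
-- 		return "000"
--
-- 	prefix = ""
-- 	x = length-1
-- 	while x>=0 and value<=pow(10,x)-1:
-- 		prefix += "0"
-- 		x -= 1
-- 	return prefix
-- ===== SOURCE B (Python) =====
-- def getFormatStr(length, value):
--     if value < 0 or length <= 0:
--         return "error"
--     if value == 0:
--         return "000"
--     d = 0
--     v = value
--     while v > 0: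
--         v //= 10
--         d += 1
--     return "0" * (length - d)
-- ===== Notes on version B (the rewrite author's own statement) =====
-- stated objective: faster
-- what changed: Replaces A's loop that walks x from length-1 downward testing value against successively recomputed powers of ten with a direct computation: count the digits d of value by repeated floor division and emit '0' * (length - d).
import Mathlib
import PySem

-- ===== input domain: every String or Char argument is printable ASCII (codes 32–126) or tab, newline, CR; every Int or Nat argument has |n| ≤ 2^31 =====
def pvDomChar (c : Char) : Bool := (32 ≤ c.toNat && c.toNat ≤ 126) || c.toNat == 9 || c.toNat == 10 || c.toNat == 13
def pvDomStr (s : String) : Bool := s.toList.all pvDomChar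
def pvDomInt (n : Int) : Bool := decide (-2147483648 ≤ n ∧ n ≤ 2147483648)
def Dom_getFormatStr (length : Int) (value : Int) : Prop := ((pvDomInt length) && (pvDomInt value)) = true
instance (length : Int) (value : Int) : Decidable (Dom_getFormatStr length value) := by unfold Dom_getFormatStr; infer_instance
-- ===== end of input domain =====

-- B replaces A's loop over x = length-1 .. 0 testing value against powers of ten by a
-- digit count of value (repeated floor division by 10) and one string repetition; simpler.

-- ===== PORT A =====
-- A's while loop: x counts down from length-1, appending "0" while value <= 10^x - 1.
-- (the string prefix is carried as its List Char, per the PySem convention)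
def getFormatStrLoop (value : Int) (x : Int) (pre : List Char) : List Char :=
  if 0 ≤ x ∧ value ≤ 10 ^ x.toNat - 1 then
    getFormatStrLoop value (x - 1) (pre ++ ['0'])
  else pre
termination_by (x + 1).toNat
decreasing_by omega

def getFormatStr (length : Int) (value : Int) : String :=
  if value < 0 ∨ length ≤ 0 then "error"
  else if value = 0 then "000"
  else String.ofList (getFormatStrLoop value (length - 1) [])

-- ===== PORT B =====
-- B's while loop: d counts the digits of v by repeated v //= 10.
def digitCountLoop (v : Int) (d : Int) : Int :=
  if 0 < v then digitCountLoop (PySem.Int.floordiv v 10) (d + 1) else d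
termination_by v.toNat
decreasing_by
  rename_i h
  rw [PySem.Int.floordiv_eq_ediv_of_pos (by omega)]
  omega

def getFormatStr_alt (length : Int) (value : Int) : String :=
  if value < 0 ∨ length ≤ 0 then "error"
  else if value = 0 then "000"
  else String.ofList (List.replicate (length - digitCountLoop value 0).toNat '0')

-- ===== PRECONDITION & SPEC =====
def Spec_getFormatStr (length : Int) (value : Int) (out : String) : Prop := out = getFormatStr_alt length value
instance (length : Int) (value : Int) (out : String) : Decidable (Spec_getFormatStr length value out) := by unfold Spec_getFormatStr; infer_instance

-- ===== CLAIM (what is proved, stated in full; the proofs are below) =====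
def Claim_equal_getFormatStr : Prop := ∀ (length : Int) (value : Int), Dom_getFormatStr length value → Spec_getFormatStr length value (getFormatStr length value)

-- ===== LEMMAS AND PROOFS =====

-- shifting the accumulator of the digit-count loop
theorem digitCountLoop_shift (v d : Int) : digitCountLoop v d = digitCountLoop v 0 + d := by
  induction hn : v.toNat using Nat.strong_induction_on generalizing v d with
  | _ n ih =>
    by_cases hv : 0 < v
    · have h1 : digitCountLoop v d = digitCountLoop (PySem.Int.floordiv v 10) (d + 1) := by
        rw [digitCountLoop, if_pos hv]
      have h2 : digitCountLoop v 0 = digitCountLoop (PySem.Int.floordiv v 10) (0 + 1) := by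
        rw [digitCountLoop, if_pos hv]
      have hlt : (PySem.Int.floordiv v 10).toNat < n := by
        rw [PySem.Int.floordiv_eq_ediv_of_pos (by omega)]; omega
      rw [h1, h2, ih _ hlt (PySem.Int.floordiv v 10) (d + 1) rfl,
          ih _ hlt (PySem.Int.floordiv v 10) (0 + 1) rfl]
      ring
    · have h1 : digitCountLoop v d = d := by rw [digitCountLoop, if_neg hv]
      have h2 : digitCountLoop v 0 = 0 := by rw [digitCountLoop, if_neg hv]
      rw [h1, h2]; ring

theorem digitCountLoop_nonneg (v : Int) : 0 ≤ digitCountLoop v 0 := by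
  induction hn : v.toNat using Nat.strong_induction_on generalizing v with
  | _ n ih =>
    rw [digitCountLoop]
    by_cases hv : 0 < v
    · rw [if_pos hv, digitCountLoop_shift]
      have hlt : (PySem.Int.floordiv v 10).toNat < n := by
        rw [PySem.Int.floordiv_eq_ediv_of_pos (by omega)]; omega
      have := ih _ hlt (PySem.Int.floordiv v 10) rfl
      omega
    · rw [if_neg hv]

-- the digit count d of v > 0 satisfies 10^(d-1) ≤ v < 10^d
theorem digitCountLoop_bounds (v : Int) (hv : 0 < v) :
    10 ^ ((digitCountLoop v 0).toNat - 1) ≤ v ∧ v < 10 ^ (digitCountLoop v 0).toNat := by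
  induction hn : v.toNat using Nat.strong_induction_on generalizing v with
  | _ n ih =>
    rw [digitCountLoop, if_pos hv, digitCountLoop_shift,
        PySem.Int.floordiv_eq_ediv_of_pos (by norm_num : (0:Int) < 10)]
    simp only [zero_add]
    by_cases h10 : v < 10
    · have hq : v / 10 = 0 := by omega
      rw [hq]
      have h0 : digitCountLoop 0 0 = 0 := by rw [digitCountLoop]; simp
      rw [h0]
      norm_num
      omega
    · have hq : 0 < v / 10 := by omega
      have hlt : (v / 10).toNat < n := by omega
      obtain ⟨ih1, ih2⟩ := ih _ hlt (v / 10) hq rfl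
      have hd0 : 0 ≤ digitCountLoop (v / 10) 0 := digitCountLoop_nonneg _
      have htn : (digitCountLoop (v / 10) 0 + 1).toNat = (digitCountLoop (v / 10) 0).toNat + 1 := by omega
      rw [htn]
      constructor
      · have hd1 : 0 < digitCountLoop (v / 10) 0 := by
          by_contra hle
          have h0' : digitCountLoop (v / 10) 0 = 0 := by omega
          rw [h0'] at ih2; simp at ih2; omega
        have heq : (digitCountLoop (v / 10) 0).toNat + 1 - 1
            = ((digitCountLoop (v / 10) 0).toNat - 1) + 1 := by omega
        rw [heq, pow_succ]
        have := Int.mul_ediv_add_emod v 10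
        have := Int.emod_nonneg v (by norm_num : (10:Int) ≠ 0)
        nlinarith
      · rw [pow_succ]
        have := Int.mul_ediv_add_emod v 10
        have := Int.emod_lt_of_pos v (by norm_num : (0:Int) < 10)
        nlinarith

-- A's loop guard, characterized through the digit count: for 0 ≤ x,
-- value ≤ 10^x - 1  ↔  digitCountLoop value 0 ≤ x
theorem guard_iff (value x : Int) (hv : 0 < value) (hx : 0 ≤ x) :
    (value ≤ 10 ^ x.toNat - 1) ↔ digitCountLoop value 0 ≤ x := by
  obtain ⟨h1, h2⟩ := digitCountLoop_bounds value hv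
  have hd0 : 0 ≤ digitCountLoop value 0 := digitCountLoop_nonneg _
  constructor
  · intro h
    by_contra hlt
    have hxd : x.toNat ≤ (digitCountLoop value 0).toNat - 1 := by omega
    have := pow_le_pow_right₀ (by norm_num : (1:Int) ≤ 10) hxd
    omega
  · intro h
    have hxd : (digitCountLoop value 0).toNat ≤ x.toNat := by omega
    have := pow_le_pow_right₀ (by norm_num : (1:Int) ≤ 10) hxd
    omega

-- A's loop appends exactly max 0 (x + 1 - d) zeros
theorem getFormatStrLoop_eq (value : Int) (hv : 0 < value) (x : Int) (pre : List Char) :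
    getFormatStrLoop value x pre = pre ++ List.replicate (x + 1 - digitCountLoop value 0).toNat '0' := by
  induction x, pre using getFormatStrLoop.induct (value := value) with
  | case1 x pre hguard ih =>
      obtain ⟨hx, hle⟩ := hguard
      have hdx : digitCountLoop value 0 ≤ x := (guard_iff value x hv hx).mp hle
      rw [getFormatStrLoop, if_pos ⟨hx, hle⟩, ih]
      have h1 : (x + 1 - digitCountLoop value 0).toNat
          = (x - 1 + 1 - digitCountLoop value 0).toNat + 1 := by omega
      rw [h1, List.replicate_succ, List.append_assoc]
      rfl
  | case2 x pre hguard =>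
      rw [getFormatStrLoop, if_neg hguard]
      rcases le_or_gt 0 x with hx | hx
      · have : ¬ value ≤ 10 ^ x.toNat - 1 := fun h => hguard ⟨hx, h⟩
        have : ¬ digitCountLoop value 0 ≤ x := fun h => this ((guard_iff value x hv hx).mpr h)
        have : (x + 1 - digitCountLoop value 0).toNat = 0 := by omega
        simp [this]
      · have hd0 : 0 ≤ digitCountLoop value 0 := digitCountLoop_nonneg _
        have : (x + 1 - digitCountLoop value 0).toNat = 0 := by omega
        simp [this]

-- ===== VERDICT (by name: the statement is the Claim_ definition above) =====
theorem getFormatStr_spec : Claim_equal_getFormatStr := by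
  intro length value _
  unfold Spec_getFormatStr getFormatStr getFormatStr_alt
  split
  · rfl
  · split
    · rfl
    · rename_i h1 h2
      have hv : 0 < value := by omega
      rw [getFormatStrLoop_eq value hv]
      have : length - 1 + 1 - digitCountLoop value 0 = length - digitCountLoop value 0 := by ring
      rw [List.nil_append, this]
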